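-- pv_equiv track=rewrite | github.com/Teruru-52/Self-Solving-Rubik-Cube3 | Self_Solving_Rubik_Cube/main/main.py | index_to_ud_ep
-- ===== SOURCE A (Python) =====
-- def index_to_ud_ep(index):
--     ep = [0] * 8
--     for i in range(6, -1, -1):
--         ep[i] = index % (8 - i)
--         index //= 8 - i
--         for j in range(i + 1, 8):
--             if ep[j] >= ep[i]:
--                 ep[j] += 1
--     return ep
-- ===== SOURCE B (Python) =====
-- def index_to_ud_ep(index):
--     # Extract factorial-base digits (same order and arithmetic as the original).
--     digits = [0] * 8
--     for i in range(6, -1, -1):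
--         digits[i] = index % (8 - i)
--         index //= 8 - i
--     # Build the permutation by popping from a shrinking list of available values.
--     avail = list(range(8))
--     return [avail.pop(d) for d in digits]
-- ===== Notes on version B (the rewrite author's own statement) =====
-- stated objective: simpler
-- what changed: A interleaves digit extraction with a retroactive inner loop that re-adjusts all already-placed later entries; B first extracts the factorial-base digits with the same % and // arithmetic, then builds the permutation directly by popping each digit's position from a shrinking list of still-available values, so the nested adjustment pass disappears.
import Mathlib
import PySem

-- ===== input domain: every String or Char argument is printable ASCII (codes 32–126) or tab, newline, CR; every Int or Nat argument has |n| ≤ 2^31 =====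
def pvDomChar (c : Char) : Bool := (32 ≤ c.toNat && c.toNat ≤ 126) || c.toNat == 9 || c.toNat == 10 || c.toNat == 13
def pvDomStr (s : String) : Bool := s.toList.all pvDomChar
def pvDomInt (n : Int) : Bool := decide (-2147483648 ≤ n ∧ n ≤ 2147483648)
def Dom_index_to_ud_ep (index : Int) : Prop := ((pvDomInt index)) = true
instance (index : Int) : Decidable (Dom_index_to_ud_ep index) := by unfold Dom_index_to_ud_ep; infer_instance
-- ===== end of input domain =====

-- B replaces A's retroactive inner adjustment loop by popping each factorial-base digit
-- from a shrinking list of still-available values (objective: simpler).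

-- ===== PORT A =====
-- literal transliteration: state (ep, index); outer loop i = 6..0, inner loop j = i+1..7
def index_to_ud_ep (index : Int) : List Int :=
  (((PySem.List.pyRange 6 (-1) (-1)).foldl
    (fun (st : List Int × Int) (i : Int) =>
      let ep := PySem.List.pySetD st.1 i (PySem.Int.mod st.2 (8 - i))
      let idx := PySem.Int.floordiv st.2 (8 - i)
      let ep := (PySem.List.pyRange (i + 1) 8 1).foldl
        (fun ep j =>
          if PySem.List.pyGetD ep i 0 ≤ PySem.List.pyGetD ep j 0 then
            PySem.List.pySetD ep j (PySem.List.pyGetD ep j 0 + 1)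
          else ep) ep
      (ep, idx))
    (List.replicate 8 (0 : Int), index))).1

-- ===== PORT B =====
-- literal transliteration of Source B: digit-extraction loop, then pop from the available list
def index_to_ud_ep_alt (index : Int) : List Int :=
  let st := (PySem.List.pyRange 6 (-1) (-1)).foldl
    (fun (st : List Int × Int) (i : Int) =>
      (PySem.List.pySetD st.1 i (PySem.Int.mod st.2 (8 - i)),
       PySem.Int.floordiv st.2 (8 - i)))
    (List.replicate 8 (0 : Int), index)
  let digits := st.1
  (digits.foldl
    (fun (acc : List Int × List Int) (d : Int) =>
      match PySem.List.pop? acc.2 d with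
      | some (v, rest) => (acc.1 ++ [v], rest)
      | none => (acc.1, acc.2))   -- unreachable: every digit is a valid index here
    ([], PySem.List.pyRange 0 8 1)).1

-- ===== PRECONDITION & SPEC =====
def Spec_index_to_ud_ep (index : Int) (out : List Int) : Prop := out = index_to_ud_ep_alt index
instance (index : Int) (out : List Int) : Decidable (Spec_index_to_ud_ep index out) := by unfold Spec_index_to_ud_ep; infer_instance

-- ===== CLAIM (what is proved, stated in full; the proofs are below) =====
def Claim_equal_index_to_ud_ep : Prop := ∀ (index : Int), Dom_index_to_ud_ep index → Spec_index_to_ud_ep index (index_to_ud_ep index)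

-- ===== LEMMAS AND PROOFS =====

-- "bump": the adjustment A applies to a later entry when a smaller digit is placed before it
def bump (d x : Int) : Int := if d ≤ x then x + 1 else x

-- adjust-decode of a digit list (A's algorithm, recursively on the digit positions)
def adj : List Int → List Int
  | [] => []
  | d :: ds => d :: (adj ds).map (bump d)

-- pop-decode of a digit list from an availability list (B's algorithm)
def popAll : List Int → List Int → List Int
  | _, [] => []
  | avail, d :: ds =>
    match PySem.List.pop? avail d with
    | some (v, rest) => v :: popAll rest ds
    | none => popAll avail ds

-- digit bounds: the i-th digit is a valid index into the shrinking availability list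
def Bnd (ds : List Int) (n : Nat) : Prop :=
  ∀ i (h : i < ds.length), 0 ≤ ds[i] ∧ ds[i] < (n : Int) - i

-- the pure list part of A as a function of the seven digits
def aStep (ep : List Int) (i dig : Int) : List Int :=
  (PySem.List.pyRange (i + 1) 8 1).foldl
    (fun ep j =>
      if PySem.List.pyGetD ep i 0 ≤ PySem.List.pyGetD ep j 0 then
        PySem.List.pySetD ep j (PySem.List.pyGetD ep j 0 + 1)
      else ep)
    (PySem.List.pySetD ep i dig)

def aCore (x6 x5 x4 x3 x2 x1 x0 : Int) : List Int :=
  aStep (aStep (aStep (aStep (aStep (aStep (aStep (List.replicate 8 0) 6 x6) 5 x5) 4 x4) 3 x3) 2 x2) 1 x1) 0 x0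

-- the pure list part of B as a function of the seven digits
def bCore (x6 x5 x4 x3 x2 x1 x0 : Int) : List Int :=
  ([x0, x1, x2, x3, x4, x5, x6, 0].foldl
    (fun (acc : List Int × List Int) (d : Int) =>
      match PySem.List.pop? acc.2 d with
      | some (v, rest) => (acc.1 ++ [v], rest)
      | none => (acc.1, acc.2))
    ([], PySem.List.pyRange 0 8 1)).1

lemma pyRange_desc : PySem.List.pyRange 6 (-1) (-1) = [6, 5, 4, 3, 2, 1, 0] := by decide

lemma A_eq (index : Int) :
    index_to_ud_ep index =
      aCore (PySem.Int.mod index 2)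
        (PySem.Int.mod (PySem.Int.floordiv index 2) 3)
        (PySem.Int.mod (PySem.Int.floordiv (PySem.Int.floordiv index 2) 3) 4)
        (PySem.Int.mod (PySem.Int.floordiv (PySem.Int.floordiv (PySem.Int.floordiv index 2) 3) 4) 5)
        (PySem.Int.mod (PySem.Int.floordiv (PySem.Int.floordiv (PySem.Int.floordiv (PySem.Int.floordiv index 2) 3) 4) 5) 6)
        (PySem.Int.mod (PySem.Int.floordiv (PySem.Int.floordiv (PySem.Int.floordiv (PySem.Int.floordiv (PySem.Int.floordiv index 2) 3) 4) 5) 6) 7)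
        (PySem.Int.mod (PySem.Int.floordiv (PySem.Int.floordiv (PySem.Int.floordiv (PySem.Int.floordiv (PySem.Int.floordiv (PySem.Int.floordiv index 2) 3) 4) 5) 6) 7) 8) := by
  simp only [index_to_ud_ep, pyRange_desc, List.foldl, aCore, aStep]
  norm_num

lemma setchain (x6 x5 x4 x3 x2 x1 x0 : Int) :
    PySem.List.pySetD (PySem.List.pySetD (PySem.List.pySetD (PySem.List.pySetD
      (PySem.List.pySetD (PySem.List.pySetD (PySem.List.pySetD (List.replicate 8 (0:Int))
        6 x6) 5 x5) 4 x4) 3 x3) 2 x2) 1 x1) 0 x0 = [x0, x1, x2, x3, x4, x5, x6, 0] := by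
  simp [PySem.List.pySetD, PySem.List.pySet?, PySem.List.pyIdx?]

lemma B_eq (index : Int) :
    index_to_ud_ep_alt index =
      bCore (PySem.Int.mod index 2)
        (PySem.Int.mod (PySem.Int.floordiv index 2) 3)
        (PySem.Int.mod (PySem.Int.floordiv (PySem.Int.floordiv index 2) 3) 4)
        (PySem.Int.mod (PySem.Int.floordiv (PySem.Int.floordiv (PySem.Int.floordiv index 2) 3) 4) 5)
        (PySem.Int.mod (PySem.Int.floordiv (PySem.Int.floordiv (PySem.Int.floordiv (PySem.Int.floordiv index 2) 3) 4) 5) 6)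
        (PySem.Int.mod (PySem.Int.floordiv (PySem.Int.floordiv (PySem.Int.floordiv (PySem.Int.floordiv (PySem.Int.floordiv index 2) 3) 4) 5) 6) 7)
        (PySem.Int.mod (PySem.Int.floordiv (PySem.Int.floordiv (PySem.Int.floordiv (PySem.Int.floordiv (PySem.Int.floordiv (PySem.Int.floordiv index 2) 3) 4) 5) 6) 7) 8) := by
  simp only [index_to_ud_ep_alt, pyRange_desc, List.foldl, bCore]
  rw [setchain]
  rfl

-- one general expansion of A's inner adjustment pass, by induction on the suffix
lemma set_len (pre : List Int) (x v : Int) (suf : List Int) :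
    (pre ++ x :: suf).set pre.length v = pre ++ v :: suf := by
  induction pre with
  | nil => rfl
  | cons a pre ih => simp [ih]

lemma inner (d : Int) : ∀ (suf pre : List Int) (i : Nat), i < pre.length → pre[i]? = some d →
    pre.length + suf.length = 8 →
    (PySem.List.pyRange (pre.length : Int) 8 1).foldl
      (fun ep j =>
        if PySem.List.pyGetD ep (i : Int) 0 ≤ PySem.List.pyGetD ep j 0 then
          PySem.List.pySetD ep j (PySem.List.pyGetD ep j 0 + 1)
        else ep)
      (pre ++ suf) = pre ++ suf.map (bump d) := by
  intro suf
  induction suf with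
  | nil =>
    intro pre i hi hd hlen
    have h8 : (pre.length : Int) = 8 := by simp at hlen; omega
    rw [h8, PySem.List.pyRange_one_eq_nil (by norm_num)]
    simp
  | cons x suf ih =>
    intro pre i hi hd hlen
    have hm : (pre.length : Int) < 8 := by simp at hlen; omega
    rw [PySem.List.pyRange_one_cons hm]
    have hread_j : PySem.List.pyGetD (pre ++ x :: suf) (pre.length : Int) 0 = x := by
      simp [List.getD_eq_getElem?_getD]
    have hread_i : PySem.List.pyGetD (pre ++ x :: suf) (i : Int) 0 = d := by
      simp [List.getD_eq_getElem?_getD, List.getElem?_append_left hi, hd]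
    have hstep :
        (if PySem.List.pyGetD (pre ++ x :: suf) (i : Int) 0 ≤ PySem.List.pyGetD (pre ++ x :: suf) (pre.length : Int) 0 then
          PySem.List.pySetD (pre ++ x :: suf) (pre.length : Int) (PySem.List.pyGetD (pre ++ x :: suf) (pre.length : Int) 0 + 1)
        else (pre ++ x :: suf)) = (pre ++ [bump d x]) ++ suf := by
      rw [hread_i, hread_j]
      by_cases hdx : d ≤ x
      · simp only [if_pos hdx, bump, PySem.List.pySetD_natCast, set_len]
        simp
      · simp only [if_neg hdx, bump]
        simp
    have hlen' : ((pre ++ [bump d x]).length : Int) = (pre.length : Int) + 1 := by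
      simp
    have ih' := ih (pre ++ [bump d x]) i
      (by simp; omega)
      (by rw [List.getElem?_append_left hi]; exact hd)
      (by simp at hlen ⊢; omega)
    rw [hlen'] at ih'
    simp only [List.foldl_cons, hstep]
    rw [List.append_assoc] at ih'
    simpa [List.append_assoc] using ih'

lemma aStep_eq (pre : List Int) (x : Int) (suf : List Int) (d : Int)
    (h : pre.length + 1 + suf.length = 8) :
    aStep (pre ++ x :: suf) (pre.length : Int) d = pre ++ d :: suf.map (bump d) := by
  unfold aStep
  rw [show PySem.List.pySetD (pre ++ x :: suf) (pre.length : Int) d = pre ++ d :: suf from by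
    simp]
  have h1 : ((pre.length : Int) + 1) = (((pre ++ [d]).length : Nat) : Int) := by simp
  have := inner d suf (pre ++ [d]) pre.length
    (by simp)
    (by simp)
    (by simp at h ⊢; omega)
  rw [h1]
  rw [show pre ++ d :: suf = (pre ++ [d]) ++ suf from by simp]
  rw [this]
  simp

lemma aCore_adj (x6 x5 x4 x3 x2 x1 x0 : Int) :
    aCore x6 x5 x4 x3 x2 x1 x0 = adj [x0, x1, x2, x3, x4, x5, x6, 0] := by
  show aStep (aStep (aStep (aStep (aStep (aStep (aStep [0,0,0,0,0,0,0,0] 6 x6) 5 x5) 4 x4) 3 x3) 2 x2) 1 x1) 0 x0 = _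
  have e6 : aStep [0,0,0,0,0,0,0,0] 6 x6 = [0,0,0,0,0,0,x6, bump x6 (0)] := by
    simpa using aStep_eq [0,0,0,0,0,0] 0 [0] x6 (by simp)
  have e5 : aStep [0,0,0,0,0,0,x6,bump x6 (0)] 5 x5 = [0,0,0,0,0,x5, bump x5 (x6), bump x5 (bump x6 (0))] := by
    simpa using aStep_eq [0,0,0,0,0] 0 [x6, bump x6 (0)] x5 (by simp)
  have e4 : aStep [0,0,0,0,0,x5,bump x5 (x6),bump x5 (bump x6 (0))] 4 x4 = [0,0,0,0,x4, bump x4 (x5), bump x4 (bump x5 (x6)), bump x4 (bump x5 (bump x6 (0)))] := by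
    simpa using aStep_eq [0,0,0,0] 0 [x5, bump x5 (x6), bump x5 (bump x6 (0))] x4 (by simp)
  have e3 : aStep [0,0,0,0,x4,bump x4 (x5),bump x4 (bump x5 (x6)),bump x4 (bump x5 (bump x6 (0)))] 3 x3 = [0,0,0,x3, bump x3 (x4), bump x3 (bump x4 (x5)), bump x3 (bump x4 (bump x5 (x6))), bump x3 (bump x4 (bump x5 (bump x6 (0))))] := by
    simpa using aStep_eq [0,0,0] 0 [x4, bump x4 (x5), bump x4 (bump x5 (x6)), bump x4 (bump x5 (bump x6 (0)))] x3 (by simp)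
  have e2 : aStep [0,0,0,x3,bump x3 (x4),bump x3 (bump x4 (x5)),bump x3 (bump x4 (bump x5 (x6))),bump x3 (bump x4 (bump x5 (bump x6 (0))))] 2 x2 = [0,0,x2, bump x2 (x3), bump x2 (bump x3 (x4)), bump x2 (bump x3 (bump x4 (x5))), bump x2 (bump x3 (bump x4 (bump x5 (x6)))), bump x2 (bump x3 (bump x4 (bump x5 (bump x6 (0)))))] := by
    simpa using aStep_eq [0,0] 0 [x3, bump x3 (x4), bump x3 (bump x4 (x5)), bump x3 (bump x4 (bump x5 (x6))), bump x3 (bump x4 (bump x5 (bump x6 (0))))] x2 (by simp)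
  have e1 : aStep [0,0,x2,bump x2 (x3),bump x2 (bump x3 (x4)),bump x2 (bump x3 (bump x4 (x5))),bump x2 (bump x3 (bump x4 (bump x5 (x6)))),bump x2 (bump x3 (bump x4 (bump x5 (bump x6 (0)))))] 1 x1 = [0,x1, bump x1 (x2), bump x1 (bump x2 (x3)), bump x1 (bump x2 (bump x3 (x4))), bump x1 (bump x2 (bump x3 (bump x4 (x5)))), bump x1 (bump x2 (bump x3 (bump x4 (bump x5 (x6))))), bump x1 (bump x2 (bump x3 (bump x4 (bump x5 (bump x6 (0))))))] := by
    simpa using aStep_eq [0] 0 [x2, bump x2 (x3), bump x2 (bump x3 (x4)), bump x2 (bump x3 (bump x4 (x5))), bump x2 (bump x3 (bump x4 (bump x5 (x6)))), bump x2 (bump x3 (bump x4 (bump x5 (bump x6 (0)))))] x1 (by simp)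
  have e0 : aStep [0,x1,bump x1 (x2),bump x1 (bump x2 (x3)),bump x1 (bump x2 (bump x3 (x4))),bump x1 (bump x2 (bump x3 (bump x4 (x5)))),bump x1 (bump x2 (bump x3 (bump x4 (bump x5 (x6))))),bump x1 (bump x2 (bump x3 (bump x4 (bump x5 (bump x6 (0))))))] 0 x0 = [x0, bump x0 (x1), bump x0 (bump x1 (x2)), bump x0 (bump x1 (bump x2 (x3))), bump x0 (bump x1 (bump x2 (bump x3 (x4)))), bump x0 (bump x1 (bump x2 (bump x3 (bump x4 (x5))))), bump x0 (bump x1 (bump x2 (bump x3 (bump x4 (bump x5 (x6)))))), bump x0 (bump x1 (bump x2 (bump x3 (bump x4 (bump x5 (bump x6 (0)))))))] := by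
    simpa using aStep_eq ([] : List Int) 0 [x1, bump x1 (x2), bump x1 (bump x2 (x3)), bump x1 (bump x2 (bump x3 (x4))), bump x1 (bump x2 (bump x3 (bump x4 (x5)))), bump x1 (bump x2 (bump x3 (bump x4 (bump x5 (x6))))), bump x1 (bump x2 (bump x3 (bump x4 (bump x5 (bump x6 (0))))))] x0 (by simp)
  rw [e6, e5, e4, e3, e2, e1, e0]
  simp [adj]

-- B's fold-with-accumulator is popAll
lemma foldl_popAll (ds : List Int) : ∀ (acc avail : List Int),
    (ds.foldl
      (fun (acc : List Int × List Int) (d : Int) =>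
        match PySem.List.pop? acc.2 d with
        | some (v, rest) => (acc.1 ++ [v], rest)
        | none => (acc.1, acc.2))
      (acc, avail)).1 = acc ++ popAll avail ds := by
  induction ds with
  | nil => intro acc avail; simp [popAll]
  | cons d ds ih =>
    intro acc avail
    simp only [List.foldl, popAll]
    rcases h : PySem.List.pop? avail d with _ | ⟨v, rest⟩
    · simp [ih]
    · simp [ih]

lemma bCore_popAll (x6 x5 x4 x3 x2 x1 x0 : Int) :
    bCore x6 x5 x4 x3 x2 x1 x0 = popAll (PySem.List.pyRange 0 8 1) [x0, x1, x2, x3, x4, x5, x6, 0] := by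
  simpa using foldl_popAll [x0, x1, x2, x3, x4, x5, x6, 0] [] (PySem.List.pyRange 0 8 1)

-- popping index k from the mapped range 0..n-1 yields f k and the mapped bumped range 0..n-2
lemma eraseIdx_range (n k : Nat) (hk : k < n) :
    (PySem.List.pyRange 0 (n : Int) 1).eraseIdx k
      = (PySem.List.pyRange 0 ((n : Int) - 1) 1).map (bump (k : Nat)) := by
  apply List.ext_getElem
  · have h1 : (PySem.List.pyRange 0 (n : Int) 1).length = n := by
      simp [PySem.List.length_pyRange_one]
    have h2 : (PySem.List.pyRange 0 ((n : Int) - 1) 1).length = n - 1 := by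
      simp [PySem.List.length_pyRange_one]
    simp [List.length_eraseIdx, h1, h2, hk]
  · intro i h1 h2
    have hlen : (PySem.List.pyRange 0 (n : Int) 1).length = n := by
      simp [PySem.List.length_pyRange_one]
    have hi : i < n - 1 := by
      have h := h2
      simp [PySem.List.length_pyRange_one] at h
      omega
    rw [List.getElem_eraseIdx]
    by_cases hik : i < k
    · simp [PySem.List.getElem_pyRange_one, bump]
      omega
    · simp [PySem.List.getElem_pyRange_one, bump]
      omega

lemma key (ds : List Int) : ∀ (n : Nat) (f : Int → Int), Bnd ds n →
    popAll ((PySem.List.pyRange 0 (n : Int) 1).map f) ds = (adj ds).map f := by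
  induction ds with
  | nil => intro n f _; simp [popAll, adj]
  | cons d ds ih =>
    intro n f hb
    have hd := hb 0 (by simp)
    simp only [List.getElem_cons_zero] at hd
    have hdk : ((d.toNat : Nat) : Int) = d := Int.toNat_of_nonneg hd.1
    have hk : d.toNat < n := by omega
    have hlen : d.toNat < ((PySem.List.pyRange 0 (n : Int) 1).map f).length := by
      simp [PySem.List.length_pyRange_one]; omega
    have hpop : PySem.List.pop? ((PySem.List.pyRange 0 (n : Int) 1).map f) d
        = some (f d, ((PySem.List.pyRange 0 ((n : Int) - 1) 1).map (bump d)).map f) := by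
      rw [← hdk, PySem.List.pop?_natCast _ _ hlen]
      simp [List.eraseIdx_map, PySem.List.getElem_pyRange_one,
        eraseIdx_range n d.toNat hk, List.map_map, hdk]
    simp only [popAll, hpop]
    have hb' : Bnd ds (n - 1) := by
      intro i h
      have := hb (i + 1) (by simpa using Nat.succ_lt_succ h)
      simp only [List.getElem_cons_succ] at this
      constructor
      · exact this.1
      · have : ds[i] < (n : Int) - (i + 1) := this.2
        have hn : 1 ≤ n := by omega
        push_cast [hn]
        omega
    have hrec := ih (n - 1) (f ∘ bump d) hb'
    have hcast : (((n - 1 : Nat) : Int)) = (n : Int) - 1 := by omega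
    rw [hcast] at hrec
    rw [← List.map_map] at hrec
    rw [hrec]
    simp [adj, List.map_map]

lemma mod_bounds (a k : Int) (hk : 0 < k) : 0 ≤ PySem.Int.mod a k ∧ PySem.Int.mod a k < k := by
  rw [PySem.Int.mod_eq_emod_of_pos hk]
  exact ⟨Int.emod_nonneg a (by omega), Int.emod_lt_of_pos a hk⟩

lemma digits_bnd (x6 x5 x4 x3 x2 x1 x0 : Int)
    (h6 : 0 ≤ x6 ∧ x6 < 2) (h5 : 0 ≤ x5 ∧ x5 < 3) (h4 : 0 ≤ x4 ∧ x4 < 4)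
    (h3 : 0 ≤ x3 ∧ x3 < 5) (h2 : 0 ≤ x2 ∧ x2 < 6) (h1 : 0 ≤ x1 ∧ x1 < 7)
    (h0 : 0 ≤ x0 ∧ x0 < 8) :
    Bnd [x0, x1, x2, x3, x4, x5, x6, 0] 8 := by
  intro i h
  simp only [List.length_cons, List.length_nil] at h
  interval_cases i <;> simp_all

-- ===== VERDICT (by name: the statement is the Claim_ definition above) =====
theorem index_to_ud_ep_spec : Claim_equal_index_to_ud_ep := by
  intro index _
  unfold Spec_index_to_ud_ep
  rw [A_eq, B_eq, aCore_adj, bCore_popAll]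
  have hb := digits_bnd (PySem.Int.mod index 2) (PySem.Int.mod (PySem.Int.floordiv index 2) 3) (PySem.Int.mod (PySem.Int.floordiv (PySem.Int.floordiv index 2) 3) 4) (PySem.Int.mod (PySem.Int.floordiv (PySem.Int.floordiv (PySem.Int.floordiv index 2) 3) 4) 5) (PySem.Int.mod (PySem.Int.floordiv (PySem.Int.floordiv (PySem.Int.floordiv (PySem.Int.floordiv index 2) 3) 4) 5) 6) (PySem.Int.mod (PySem.Int.floordiv (PySem.Int.floordiv (PySem.Int.floordiv (PySem.Int.floordiv (PySem.Int.floordiv index 2) 3) 4) 5) 6) 7) (PySem.Int.mod (PySem.Int.floordiv (PySem.Int.floordiv (PySem.Int.floordiv (PySem.Int.floordiv (PySem.Int.floordiv (PySem.Int.floordiv index 2) 3) 4) 5) 6) 7) 8)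
    (mod_bounds _ 2 (by norm_num)) (mod_bounds _ 3 (by norm_num)) (mod_bounds _ 4 (by norm_num)) (mod_bounds _ 5 (by norm_num)) (mod_bounds _ 6 (by norm_num)) (mod_bounds _ 7 (by norm_num)) (mod_bounds _ 8 (by norm_num))
  have h := key _ 8 id hb
  simpa using h.symm
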